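-- pv_equiv track=rewrite | github.com/joyful-young/OnlineJudge | 프로그래머스/3/42895. N으로 표현/N으로 표현.py | solution
-- ===== SOURCE A (Python) =====
-- def solution(N, number):
--     if N == number:
--         return 1
--
--
--     num_sets = [set() for _ in range(9)]    # N은 최대 8개까지만 사용
--     num_sets[1] = {N}
--
--     total = {N}
--
--     num_str = str(N)
--     for i in range(2, 9):
--         # N i개를 써서 만들 수 있는 숫자 구하기
--         num_set = set()
--
--         # NNN...
--         num = 11 * N
--         for _ in range(i - 2):
--             num = 10 * num + N
--         num_set.add(num)
--
--         # j개 쓴 숫자, (i - j)개 쓴 숫자를 서로 연산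
--         for j in range(1, i // 2 + 1):
--             for a in num_sets[j]:
--                 for b in num_sets[i - j]:
--                     temp = [a + b, a * b, a - b, b - a, a // b, b // a]
--                     num_set.update([x for x in temp if x != 0])
--
--         if number in num_set:
--             return i
--
--         num_set.difference_update(total)
--         num_sets[i] = num_set
--         total.update(num_set)
--
--     return -1
-- ===== SOURCE B (Python) =====
-- def solution(N, number):
--     lvls = {}                 # k -> set of values expressible with exactly k copies of N
--
--     def reachable(k):
--         if k not in lvls:
--             if k == 1:
--                 s = {N}
--             else:
--                 s = {N * ((10 ** k - 1) // 9)}      # N written k times, as a closed form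
--                 for j in range(1, k):
--                     left, right = reachable(j), reachable(k - j)
--                     for a in left:
--                         for b in right:
--                             s.update(x for x in (a + b, a * b, a - b, a // b) if x != 0)
--             lvls[k] = s
--         return lvls[k]
--
--     return next((k for k in range(1, 9) if number in reachable(k)), -1)
-- ===== Notes on version B (the rewrite author's own statement) =====
-- stated objective: simpler
-- what changed: B replaces A's bottom-up staged loop (build level i, test during the build, dedup against a running 'total' set) by a top-down memoized recursion reachable(k) over pure exact-count sets (closed-form repunit, 4 operations over the full split range instead of 6 over the half range, no dedup and no in-loop early return), with the answer read off as the first k in 1..8 whose set contains number.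
-- outside the precondition, e.g. on solution(0, 5): A raises ZeroDivisionError, B raises ZeroDivisionError
import Mathlib
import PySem

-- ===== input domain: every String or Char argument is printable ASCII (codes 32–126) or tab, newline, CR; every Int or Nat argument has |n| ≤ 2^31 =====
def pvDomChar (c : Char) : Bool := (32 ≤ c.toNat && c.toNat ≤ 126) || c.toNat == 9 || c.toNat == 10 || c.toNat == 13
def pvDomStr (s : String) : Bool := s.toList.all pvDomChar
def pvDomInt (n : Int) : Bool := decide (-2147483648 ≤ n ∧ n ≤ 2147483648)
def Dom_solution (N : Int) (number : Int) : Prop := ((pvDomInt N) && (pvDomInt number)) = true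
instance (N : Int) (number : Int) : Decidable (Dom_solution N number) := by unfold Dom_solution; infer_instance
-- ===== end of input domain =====

-- B replaces A's bottom-up staged loop (build level i, test while building, dedup against a
-- running 'total') by a top-down memoized recursion reachable(k) over pure exact-count sets
-- (closed-form repunit, 4 operations over the full split range instead of 6 over the half
-- range, no dedup), reading the answer off as the first k in 1..8 whose set holds number
-- (objective: simpler).

-- ===== PORT A =====
-- Python-set primitives spelled with decide-membership; each is PROVED equal to the
-- corresponding PySem.Set operation below (pvMem_eq, pvAdd_eq, pvUpdate_eq, pvDiff_eq),
-- so both ports' set semantics are exactly PySem's.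
def pvMem (x : Int) (s : List Int) : Bool := decide (x ∈ s)
def pvAdd (s : PySem.Set Int) (x : Int) : PySem.Set Int := if pvMem x s then s else s ++ [x]
def pvUpdate (s : PySem.Set Int) (xs : List Int) : PySem.Set Int := xs.foldl pvAdd s
def pvDiff (s t : PySem.Set Int) : PySem.Set Int := s.filter (fun x => !pvMem x t)

def opsA (a b : Int) : List Int :=
  [a + b, a * b, a - b, b - a, PySem.Int.floordiv a b, PySem.Int.floordiv b a]

-- num = 11*N; for _ in range(i-2): num = 10*num + N
def repAfold (N : Int) (i : Nat) : Int :=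
  (List.range (i - 2)).foldl (fun num _ => 10 * num + N) (11 * N)

-- num_set = {num}; for j in range(1, i//2+1): for a in num_sets[j]: for b in num_sets[i-j]: update
def buildA (N : Int) (sets : List (PySem.Set Int)) (i : Nat) : PySem.Set Int :=
  (List.range' 1 (i / 2)).foldl
    (fun ns j =>
      (sets.getD j []).foldl
        (fun ns a =>
          (sets.getD (i - j) []).foldl
            (fun ns b => pvUpdate ns ((opsA a b).filter (fun x => x != 0))) ns) ns)
    (PySem.Set.add PySem.Set.empty (repAfold N i))

def loopA (N number : Int) (i : Nat) (sets : List (PySem.Set Int)) (total : PySem.Set Int) : Int :=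
  if i ≥ 9 then -1
  else
    let s := buildA N sets i
    if number ∈ s then (i : Int)
    else
      loopA N number (i + 1) (sets.set i (pvDiff s total))
        (pvUpdate total (pvDiff s total))
  termination_by 9 - i
  decreasing_by omega

def solution (N : Int) (number : Int) : Int :=
  if N == number then 1
  else
    loopA N number 2
      ((List.replicate 9 (PySem.Set.empty : PySem.Set Int)).set 1
        (PySem.Set.add PySem.Set.empty N))
      (PySem.Set.add PySem.Set.empty N)

-- ===== PORT B =====
def opsB (a b : Int) : List Int := [a + b, a * b, a - b, PySem.Int.floordiv a b]

-- N * ((10 ** k - 1) // 9)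
def repB (N : Int) (k : Nat) : Int := N * PySem.Int.floordiv (10 ^ (k : Nat) - 1) 9

-- def reachable(k): if k not in lvls: (k==1 -> {N}; else repunit seed, then for j in 1..k-1
-- combine reachable(j) with reachable(k-j) by the 4 ops, dropping zeros); lvls[k] = s; return lvls[k]
-- (the memo dict 'lvls' is threaded as state)
def reachB (N : Int) : (k : Nat) → PySem.Dict Int (PySem.Set Int) →
    PySem.Set Int × PySem.Dict Int (PySem.Set Int)
  | k, lvls =>
    match PySem.Dict.get? lvls (k : Int) with
    | some s => (s, lvls)
    | none =>
      let p : PySem.Set Int × PySem.Dict Int (PySem.Set Int) :=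
        if k = 1 then (PySem.Set.add PySem.Set.empty N, lvls)
        else
          (List.range' 1 (k - 1)).attach.foldl
            (fun p j =>
              let q1 := reachB N j.1 p.2
              let q2 := reachB N (k - j.1) q1.2
              (q1.1.foldl
                (fun s a =>
                  q2.1.foldl
                    (fun s b => pvUpdate s ((opsB a b).filter (fun x => x != 0))) s)
                p.1, q2.2))
            (PySem.Set.add PySem.Set.empty (repB N k), lvls)
      (p.1, PySem.Dict.insert p.2 (k : Int) p.1)
  termination_by k _ => k
  decreasing_by
    · have hj := j.2; simp [List.mem_range'_1] at hj; omega
    · have hj := j.2; simp [List.mem_range'_1] at hj; omega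

-- next((k for k in range(1, 9) if number in reachable(k)), -1)
def nextB (N number : Int) : List Nat → PySem.Dict Int (PySem.Set Int) → Int
  | [], _ => -1
  | k :: ks, lvls =>
    let q := reachB N k lvls
    if pvMem number q.1 then (k : Int) else nextB N number ks q.2

def solution_alt (N : Int) (number : Int) : Int :=
  nextB N number (List.range' 1 8) PySem.Dict.empty

-- ===== PRECONDITION & SPEC =====
-- Pre_ excludes N = 0 with number ≠ 0: there Python A raises ZeroDivisionError (0 // 0 on the
-- combination step), and B raises the same way.
def Pre_solution (N : Int) (number : Int) : Prop := N ≠ 0 ∨ number = N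
instance (N : Int) (number : Int) : Decidable (Pre_solution N number) := by
  unfold Pre_solution; infer_instance

def pvWitness_solution : Int × Int := (5, 12)

def Spec_solution (N : Int) (number : Int) (out : Int) : Prop := out = solution_alt N number
instance (N : Int) (number : Int) (out : Int) : Decidable (Spec_solution N number out) := by
  unfold Spec_solution; infer_instance

-- ===== CLAIM (what is proved, stated in full; the proofs are below) =====
def Claim_equal_solution : Prop :=
  ∀ (N : Int) (number : Int), Dom_solution N number → Pre_solution N number →
    Spec_solution N number (solution N number)

-- ===== LEMMAS AND PROOFS =====

theorem pvMem_eq (x : Int) (s : List Int) : pvMem x s = PySem.Set.contains s x := by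
  by_cases h : x ∈ s <;> simp [pvMem, PySem.Set.contains, h]

theorem pvAdd_eq (s : PySem.Set Int) (x : Int) : pvAdd s x = PySem.Set.add s x := by
  simp [pvAdd, PySem.Set.add, pvMem_eq]

theorem pvUpdate_eq : ∀ (xs : List Int) (s : PySem.Set Int),
    pvUpdate s xs = PySem.Set.update s xs := by
  intro xs
  induction xs with
  | nil => intro s; rfl
  | cons x xs ih =>
    intro s
    show xs.foldl pvAdd (pvAdd s x) = _
    rw [show xs.foldl pvAdd (pvAdd s x) = pvUpdate (pvAdd s x) xs from rfl, ih, pvAdd_eq]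
    rfl

theorem pvDiff_eq (s t : PySem.Set Int) : pvDiff s t = PySem.Set.diff s t := by
  unfold pvDiff PySem.Set.diff
  rw [show (fun x => !pvMem x t) = (fun x : Int => !PySem.Set.contains t x) from
    funext (fun x => by rw [pvMem_eq])]

-- add to the empty set
theorem pv_add_empty (x : Int) : PySem.Set.add PySem.Set.empty x = [x] := rfl

-- pure level sets (proof-side): buildB/BlvList/Blv describe what reachB's memo holds
def buildB (N : Int) (lvls : List (PySem.Set Int)) (k : Nat) : PySem.Set Int :=
  (List.range' 1 (k - 1)).foldl
    (fun s j =>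
      (lvls.getD j []).foldl
        (fun s a =>
          (lvls.getD (k - j) []).foldl
            (fun s b => pvUpdate s ((opsB a b).filter (fun x => x != 0))) s) s)
    (PySem.Set.add PySem.Set.empty (repB N k))

def BlvList (N : Int) : Nat → List (PySem.Set Int)
  | 0 => [PySem.Set.empty, PySem.Set.add PySem.Set.empty N]
  | m + 1 => BlvList N m ++ [buildB N (BlvList N m) (m + 2)]

def Blv (N : Int) (k : Nat) : PySem.Set Int := (BlvList N (k - 1)).getD k []

-- generic membership in a fold that only ever adds elements
theorem pv_mem_foldl_layer {α : Type} (F : List Int → α → List Int) (P : α → Int → Prop)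
    (hF : ∀ s y x, x ∈ F s y ↔ x ∈ s ∨ P y x) :
    ∀ (l : List α) (s : List Int) (x : Int), x ∈ l.foldl F s ↔ x ∈ s ∨ ∃ y ∈ l, P y x := by
  intro l
  induction l with
  | nil => simp
  | cons y l ih =>
    intro s x
    simp only [List.foldl_cons, ih, hF, List.mem_cons]
    constructor
    · rintro (⟨h | h⟩ | ⟨y', hy', h⟩)
      · exact Or.inl h
      · exact Or.inr ⟨y, Or.inl rfl, h⟩
      · exact Or.inr ⟨y', Or.inr hy', h⟩
    · rintro (h | ⟨y', (rfl | hy'), h⟩)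
      · exact Or.inl (Or.inl h)
      · exact Or.inl (Or.inr h)
      · exact Or.inr ⟨y', hy', h⟩

-- membership in the common shape of buildA/buildB
theorem pv_mem_buildGen (ops : Int → Int → List Int) (r : Int)
    (lvls : List (PySem.Set Int)) (js : List Nat) (k : Nat) (x : Int) :
    x ∈ js.foldl
        (fun s j =>
          (lvls.getD j []).foldl
            (fun s a =>
              (lvls.getD (k - j) []).foldl
                (fun s b => pvUpdate s ((ops a b).filter (fun y => y != 0))) s) s)
        (PySem.Set.add PySem.Set.empty r)
      ↔ x = r ∨ ∃ j ∈ js, ∃ a ∈ lvls.getD j [], ∃ b ∈ lvls.getD (k - j) [],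
          x ∈ ops a b ∧ x ≠ 0 := by
  have hInner : ∀ (a : Int) (bs : List Int) (s : List Int) (x : Int),
      x ∈ bs.foldl (fun s b => pvUpdate s ((ops a b).filter (fun y => y != 0))) s
        ↔ x ∈ s ∨ ∃ b ∈ bs, x ∈ ops a b ∧ x ≠ 0 := by
    intro a bs s x
    refine pv_mem_foldl_layer _ (fun b x => x ∈ ops a b ∧ x ≠ 0) ?_ bs s x
    intro s' b x'
    rw [pvUpdate_eq]
    simp [PySem.Set.mem_update, List.mem_filter]
  have hMid : ∀ (j : Nat) (as : List Int) (s : List Int) (x : Int),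
      x ∈ as.foldl
          (fun s a =>
            (lvls.getD (k - j) []).foldl
              (fun s b => pvUpdate s ((ops a b).filter (fun y => y != 0))) s) s
        ↔ x ∈ s ∨ ∃ a ∈ as, ∃ b ∈ lvls.getD (k - j) [], x ∈ ops a b ∧ x ≠ 0 := by
    intro j as s x
    exact pv_mem_foldl_layer _ (fun a x => ∃ b ∈ lvls.getD (k - j) [], x ∈ ops a b ∧ x ≠ 0)
      (fun s' a x' => hInner a _ s' x') as s x
  rw [pv_mem_foldl_layer _
      (fun j x => ∃ a ∈ lvls.getD j [], ∃ b ∈ lvls.getD (k - j) [], x ∈ ops a b ∧ x ≠ 0)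
      (fun s' j x' => hMid j _ s' x') js _ x]
  rw [pv_add_empty]
  simp

theorem pv_mem_buildA (N : Int) (sets : List (PySem.Set Int)) (i : Nat) (x : Int) :
    x ∈ buildA N sets i ↔ x = repAfold N i ∨
      ∃ j, 1 ≤ j ∧ j ≤ i / 2 ∧ ∃ a, a ∈ sets.getD j [] ∧ ∃ b, b ∈ sets.getD (i - j) [] ∧
        x ∈ opsA a b ∧ x ≠ 0 := by
  unfold buildA
  rw [pv_mem_buildGen]
  constructor
  · rintro (h | ⟨j, hj, a, ha, b, hb, h⟩)
    · exact Or.inl h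
    · refine Or.inr ⟨j, ?_, ?_, a, ha, b, hb, h⟩ <;> (simp [List.mem_range'_1] at hj; omega)
  · rintro (h | ⟨j, hj1, hj2, a, ha, b, hb, h⟩)
    · exact Or.inl h
    · exact Or.inr ⟨j, by simp [List.mem_range'_1]; omega, a, ha, b, hb, h⟩

theorem pv_mem_buildB (N : Int) (lvls : List (PySem.Set Int)) (k : Nat) (x : Int) :
    x ∈ buildB N lvls k ↔ x = repB N k ∨
      ∃ j, 1 ≤ j ∧ j ≤ k - 1 ∧ ∃ a, a ∈ lvls.getD j [] ∧ ∃ b, b ∈ lvls.getD (k - j) [] ∧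
        x ∈ opsB a b ∧ x ≠ 0 := by
  unfold buildB
  rw [pv_mem_buildGen]
  constructor
  · rintro (h | ⟨j, hj, a, ha, b, hb, h⟩)
    · exact Or.inl h
    · refine Or.inr ⟨j, ?_, ?_, a, ha, b, hb, h⟩ <;> (simp [List.mem_range'_1] at hj; omega)
  · rintro (h | ⟨j, hj1, hj2, a, ha, b, hb, h⟩)
    · exact Or.inl h
    · exact Or.inr ⟨j, by simp [List.mem_range'_1]; omega, a, ha, b, hb, h⟩

theorem pv_length_BlvList (N : Int) : ∀ m, (BlvList N m).length = m + 2 := by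
  intro m
  induction m with
  | zero => rfl
  | succ m ih => simp [BlvList, ih]

theorem pv_getD_BlvList (N : Int) : ∀ m k, k ≤ m + 1 →
    (BlvList N m).getD k [] = Blv N k := by
  intro m
  induction m with
  | zero =>
    intro k hk
    interval_cases k <;> rfl
  | succ m ih =>
    intro k hk
    by_cases h : k ≤ m + 1
    · rw [show BlvList N (m + 1) = BlvList N m ++ [buildB N (BlvList N m) (m + 2)] from rfl,
        List.getD_append _ _ _ _ (by rw [pv_length_BlvList]; omega)]
      exact ih k h
    · have hk2 : k = m + 2 := by omega
      subst hk2
      rfl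

theorem pv_Blv_succ (N : Int) (k : Nat) (hk : 2 ≤ k) :
    Blv N k = buildB N (BlvList N (k - 2)) k := by
  obtain ⟨m, rfl⟩ : ∃ m, k = m + 2 := ⟨k - 2, by omega⟩
  show (BlvList N (m + 1)).getD (m + 2) [] = _
  rw [show BlvList N (m + 1) = BlvList N m ++ [buildB N (BlvList N m) (m + 2)] from rfl]
  rw [List.getD_eq_getElem?_getD, List.getElem?_append_right (by rw [pv_length_BlvList])]
  simp [pv_length_BlvList]

theorem pv_Blv_one (N : Int) : Blv N 1 = [N] := rfl

theorem pv_mem_Blv (N : Int) (k : Nat) (hk : 2 ≤ k) (x : Int) :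
    x ∈ Blv N k ↔ x = repB N k ∨
      ∃ j, 1 ≤ j ∧ j < k ∧ ∃ a, a ∈ Blv N j ∧ ∃ b, b ∈ Blv N (k - j) ∧
        x ∈ opsB a b ∧ x ≠ 0 := by
  rw [pv_Blv_succ N k hk, pv_mem_buildB]
  constructor
  · rintro (h | ⟨j, hj1, hj2, a, ha, b, hb, h⟩)
    · exact Or.inl h
    · rw [pv_getD_BlvList N (k - 2) j (by omega)] at ha
      rw [pv_getD_BlvList N (k - 2) (k - j) (by omega)] at hb
      exact Or.inr ⟨j, hj1, by omega, a, ha, b, hb, h⟩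
  · rintro (h | ⟨j, hj1, hj2, a, ha, b, hb, h⟩)
    · exact Or.inl h
    · rw [← pv_getD_BlvList N (k - 2) j (by omega)] at ha
      rw [← pv_getD_BlvList N (k - 2) (k - j) (by omega)] at hb
      exact Or.inr ⟨j, hj1, by omega, a, ha, b, hb, h⟩

-- ===== reachB computes the pure level sets (memo-correctness) =====
def MemoOK (N : Int) (lvls : PySem.Dict Int (PySem.Set Int)) : Prop :=
  ∀ (m : Nat) (s : PySem.Set Int), PySem.Dict.get? lvls (m : Int) = some s → s = Blv N m

theorem pv_MemoOK_empty (N : Int) : MemoOK N PySem.Dict.empty := by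
  intro m s h
  simp [PySem.Dict.get?_empty] at h

theorem pv_MemoOK_insert (N : Int) (lvls : PySem.Dict Int (PySem.Set Int)) (k : Nat)
    (h : MemoOK N lvls) (s : PySem.Set Int) (hsk : s = Blv N k) :
    MemoOK N (PySem.Dict.insert lvls (k : Int) s) := by
  intro m t ht
  rw [PySem.Dict.get?_insert] at ht
  split_ifs at ht with hm
  · have : m = k := by exact_mod_cast hm
    subst this
    cases ht
    exact hsk
  · exact h m t ht

theorem pv_reachB_eq (N : Int) : ∀ (k : Nat), 1 ≤ k →
    ∀ (lvls : PySem.Dict Int (PySem.Set Int)), MemoOK N lvls →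
      (reachB N k lvls).1 = Blv N k ∧ MemoOK N (reachB N k lvls).2 := by
  intro k
  induction k using Nat.strong_induction_on with
  | _ k ih =>
    intro hk1 lvls hOK
    rw [reachB]
    cases hget : PySem.Dict.get? lvls (k : Int) with
    | some s =>
      exact ⟨hOK k s hget, hOK⟩
    | none =>
      simp only
      by_cases hk : k = 1
      · subst hk
        refine ⟨by rw [pv_Blv_one]; rfl, ?_⟩
        exact pv_MemoOK_insert N lvls 1 hOK _ (by rw [pv_Blv_one]; rfl)
      · simp only [if_neg hk]
        have hk2 : 2 ≤ k := by omega
        -- the fold threading the memo: set component is the pure fold, memo stays OK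
        have hfold : ∀ (l : List {x // x ∈ List.range' 1 (k - 1)})
            (s0 : PySem.Set Int) (lv : PySem.Dict Int (PySem.Set Int)), MemoOK N lv →
            (l.foldl
              (fun p j =>
                let q1 := reachB N j.1 p.2
                let q2 := reachB N (k - j.1) q1.2
                (q1.1.foldl
                  (fun s a =>
                    q2.1.foldl
                      (fun s b => pvUpdate s ((opsB a b).filter (fun x => x != 0))) s)
                  p.1, q2.2))
              (s0, lv)).1
            = (l.map (fun j => j.1)).foldl
              (fun s j =>
                (Blv N j).foldl
                  (fun s a =>
                    (Blv N (k - j)).foldl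
                      (fun s b => pvUpdate s ((opsB a b).filter (fun x => x != 0))) s) s)
              s0
            ∧ MemoOK N (l.foldl
              (fun p j =>
                let q1 := reachB N j.1 p.2
                let q2 := reachB N (k - j.1) q1.2
                (q1.1.foldl
                  (fun s a =>
                    q2.1.foldl
                      (fun s b => pvUpdate s ((opsB a b).filter (fun x => x != 0))) s)
                  p.1, q2.2))
              (s0, lv)).2 := by
          intro l
          induction l with
          | nil => intro s0 lv hlv; exact ⟨rfl, hlv⟩
          | cons j l ihl =>
            intro s0 lv hlv
            obtain ⟨j, hj⟩ := j
            have hjb : 1 ≤ j ∧ j < k := by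
              simp [List.mem_range'_1] at hj; omega
            have h1 := ih j hjb.2 hjb.1 lv hlv
            have h2 := ih (k - j) (by omega) (by omega) (reachB N j lv).2 h1.2
            simp only [List.map_cons, List.foldl_cons]
            rw [h1.1, h2.1] at *
            exact ihl _ _ h2.2
        have hmain := hfold (List.range' 1 (k - 1)).attach
          (PySem.Set.add PySem.Set.empty (repB N k)) lvls hOK
        have hpure : ((List.range' 1 (k - 1)).attach.map (fun j => j.1)).foldl
            (fun s j =>
              (Blv N j).foldl
                (fun s a =>
                  (Blv N (k - j)).foldl
                    (fun s b => pvUpdate s ((opsB a b).filter (fun x => x != 0))) s) s)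
            (PySem.Set.add PySem.Set.empty (repB N k))
            = Blv N k := by
          rw [List.attach_map_subtype_val, pv_Blv_succ N k hk2]
          unfold buildB
          refine PySem.List.foldl_congr_mem _ _ _ _ ?_
          intro s j hjmem
          have hjb : 1 ≤ j ∧ j < k := by
            simp [List.mem_range'_1] at hjmem; omega
          rw [pv_getD_BlvList N (k - 2) j (by omega),
            pv_getD_BlvList N (k - 2) (k - j) (by omega)]
        refine ⟨by rw [hmain.1, hpure], ?_⟩
        exact pv_MemoOK_insert N _ k hmain.2 _ (by rw [hmain.1, hpure])

-- ===== the ops and closure facts used by A's invariant =====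
theorem pv_opsB_sub (a b x : Int) (h : x ∈ opsB a b) : x ∈ opsA a b := by
  simp only [opsA, opsB, List.mem_cons, List.not_mem_nil, or_false] at *
  tauto

theorem pv_opsA_symm (a b x : Int) (h : x ∈ opsA a b) : x ∈ opsA b a := by
  simp only [opsA, List.mem_cons, List.not_mem_nil, or_false] at *
  rcases h with rfl | rfl | rfl | rfl | rfl | rfl
  · exact Or.inl (add_comm a b)
  · exact Or.inr (Or.inl (mul_comm a b))
  · exact Or.inr (Or.inr (Or.inr (Or.inl rfl)))
  · exact Or.inr (Or.inr (Or.inl rfl))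
  · exact Or.inr (Or.inr (Or.inr (Or.inr (Or.inr rfl))))
  · exact Or.inr (Or.inr (Or.inr (Or.inr (Or.inl rfl))))

-- closure of the pure levels under A's six operations
theorem pv_Blv_closure (N : Int) (j m : Nat) (a b x : Int) (hj : 1 ≤ j) (hm : 1 ≤ m)
    (ha : a ∈ Blv N j) (hb : b ∈ Blv N m) (hx : x ∈ opsA a b) (h0 : x ≠ 0) :
    x ∈ Blv N (j + m) := by
  rw [pv_mem_Blv N (j + m) (by omega)]
  right
  simp only [opsA, List.mem_cons, List.not_mem_nil, or_false] at hx
  have hjm : j + m - j = m := by omega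
  have hmj : j + m - m = j := by omega
  rcases hx with rfl | rfl | rfl | rfl | rfl | rfl
  · exact ⟨j, hj, by omega, a, ha, b, by rw [hjm]; exact hb, by simp [opsB], h0⟩
  · exact ⟨j, hj, by omega, a, ha, b, by rw [hjm]; exact hb, by simp [opsB], h0⟩
  · exact ⟨j, hj, by omega, a, ha, b, by rw [hjm]; exact hb, by simp [opsB], h0⟩
  · exact ⟨m, hm, by omega, b, hb, a, by rw [hmj]; exact ha, by simp [opsB], h0⟩
  · exact ⟨j, hj, by omega, a, ha, b, by rw [hjm]; exact hb, by simp [opsB], h0⟩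
  · exact ⟨m, hm, by omega, b, hb, a, by rw [hmj]; exact ha, by simp [opsB], h0⟩

-- the repunit: A's incremental loop = B's closed form
def pvOnes : Nat → Int
  | 0 => 0
  | k + 1 => 10 * pvOnes k + 1

theorem pv_nine_ones : ∀ k, 9 * pvOnes k = 10 ^ k - 1 := by
  intro k
  induction k with
  | zero => rfl
  | succ k ih =>
    have e : pvOnes (k + 1) = 10 * pvOnes k + 1 := rfl
    rw [e, pow_succ]
    linarith

theorem pv_repB_eq (N : Int) (k : Nat) : repB N k = N * pvOnes k := by
  unfold repB
  rw [← pv_nine_ones, PySem.Int.floordiv_eq_ediv_of_pos (by norm_num),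
    Int.mul_ediv_cancel_left _ (by norm_num)]

theorem pv_repA_eq (N : Int) (k : Nat) (hk : 2 ≤ k) : repAfold N k = repB N k := by
  have h : ∀ m, (List.range m).foldl (fun num _ => 10 * num + N) (11 * N)
      = pvOnes (m + 2) * N := by
    intro m
    induction m with
    | zero => show 11 * N = pvOnes 2 * N; norm_num [pvOnes]
    | succ m ih =>
      rw [List.range_succ, List.foldl_append, ih]
      show 10 * (pvOnes (m + 2) * N) + N = pvOnes (m + 3) * N
      have e : pvOnes (m + 3) = 10 * pvOnes (m + 2) + 1 := rfl
      rw [e]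
      ring
  unfold repAfold
  rw [h, pv_repB_eq, show k - 2 + 2 = k by omega, mul_comm]

-- getD/set helpers
theorem pv_getD_set_self (l : List (PySem.Set Int)) (i : Nat) (a : PySem.Set Int)
    (h : i < l.length) : (l.set i a).getD i [] = a := by
  rw [List.getD_eq_getElem?_getD, List.getElem?_set_self h]; rfl

theorem pv_getD_set_ne (l : List (PySem.Set Int)) (i n : Nat) (a : PySem.Set Int)
    (h : n ≠ i) : (l.set i a).getD n [] = l.getD n [] := by
  rw [List.getD_eq_getElem?_getD, List.getElem?_set_ne (by omega), ← List.getD_eq_getElem?_getD]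

-- A's loop invariant
structure AInv (N number : Int) (i : Nat) (sets : List (PySem.Set Int))
    (total : PySem.Set Int) : Prop where
  len : sets.length = 9
  one : sets.getD 1 [] = [N]
  mem_E : ∀ m x, m < i → x ∈ sets.getD m [] → 1 ≤ m ∧ x ∈ Blv N m
  no_num : ∀ m, number ∉ sets.getD m []
  comb : ∀ m m' a b x, 1 ≤ m → 1 ≤ m' → m + m' < i → a ∈ sets.getD m [] →
    b ∈ sets.getD m' [] → x ∈ opsA a b → x ≠ 0 →
    ∃ r, 1 ≤ r ∧ r ≤ m + m' ∧ x ∈ sets.getD r []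
  rep : ∀ j, 2 ≤ j → j < i → ∃ r, 1 ≤ r ∧ r ≤ j ∧ repB N j ∈ sets.getD r []
  tot : ∀ x, x ∈ total → ∃ m, 1 ≤ m ∧ m < i ∧ x ∈ sets.getD m []

theorem pv_AInv_down {N number : Int} {i : Nat} {sets : List (PySem.Set Int)}
    {total : PySem.Set Int} (inv : AInv N number i sets total) :
    ∀ k, 1 ≤ k → k < i → ∀ x, x ∈ Blv N k →
      ∃ m, 1 ≤ m ∧ m ≤ k ∧ x ∈ sets.getD m [] := by
  intro k
  induction k using Nat.strong_induction_on with
  | _ k ih =>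
    intro hk1 hki x hx
    by_cases hk2 : 2 ≤ k
    · rw [pv_mem_Blv N k hk2] at hx
      rcases hx with rfl | ⟨j, hj1, hj2, a, ha, b, hb, hops, h0⟩
      · exact inv.rep k hk2 hki
      · obtain ⟨m, hm1, hm2, hma⟩ := ih j hj2 hj1 (by omega) a ha
        obtain ⟨m', hm'1, hm'2, hmb⟩ := ih (k - j) (by omega) (by omega) (by omega) b hb
        obtain ⟨r, hr1, hr2, hxr⟩ := inv.comb m m' a b x hm1 hm'1 (by omega) hma hmb
          (pv_opsB_sub a b x hops) h0
        exact ⟨r, hr1, by omega, hxr⟩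
    · have hk : k = 1 := by omega
      subst hk
      rw [pv_Blv_one] at hx
      simp at hx
      subst hx
      exact ⟨1, le_refl 1, le_refl 1, by rw [inv.one]; simp⟩

theorem pv_up {N number : Int} {i : Nat} {sets : List (PySem.Set Int)}
    {total : PySem.Set Int} (inv : AInv N number i sets total) (h2 : 2 ≤ i)
    (x : Int) (hx : x ∈ buildA N sets i) : x ∈ Blv N i := by
  rw [pv_mem_buildA] at hx
  rcases hx with rfl | ⟨j, hj1, hj2, a, ha, b, hb, hops, h0⟩
  · rw [pv_repA_eq N i h2, pv_mem_Blv N i h2]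
    exact Or.inl rfl
  · obtain ⟨-, hEa⟩ := inv.mem_E j a (by omega) ha
    obtain ⟨-, hEb⟩ := inv.mem_E (i - j) b (by omega) hb
    have := pv_Blv_closure N j (i - j) a b x hj1 (by omega) hEa hEb hops h0
    rwa [show j + (i - j) = i by omega] at this

theorem pv_pairup {N : Int} {i : Nat} {sets : List (PySem.Set Int)}
    (m m' : Nat) (a b x : Int) (hm : 1 ≤ m) (hm' : 1 ≤ m') (hsum : m + m' = i)
    (ha : a ∈ sets.getD m []) (hb : b ∈ sets.getD m' []) (hx : x ∈ opsA a b)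
    (h0 : x ≠ 0) : x ∈ buildA N sets i := by
  rw [pv_mem_buildA]
  right
  by_cases hc : m ≤ m'
  · exact ⟨m, hm, by omega, a, ha, b, by rw [show i - m = m' by omega]; exact hb, hx, h0⟩
  · exact ⟨m', hm', by omega, b, hb, a, by rw [show i - m' = m by omega]; exact ha,
      pv_opsA_symm a b x hx, h0⟩

theorem pv_key {N number : Int} {i : Nat} {sets : List (PySem.Set Int)}
    {total : PySem.Set Int} (inv : AInv N number i sets total) (h2 : 2 ≤ i) :
    (number ∈ buildA N sets i) ↔ number ∈ Blv N i := by
  constructor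
  · exact pv_up inv h2 number
  · intro h
    rw [pv_mem_Blv N i h2] at h
    rcases h with h | ⟨j, hj1, hj2, a, ha, b, hb, hops, h0⟩
    · rw [pv_mem_buildA]
      exact Or.inl (h.trans (pv_repA_eq N i h2).symm)
    · obtain ⟨m, hm1, hm2, hma⟩ := pv_AInv_down inv j hj1 (by omega) a ha
      obtain ⟨m', hm'1, hm'2, hmb⟩ := pv_AInv_down inv (k := i - j) (by omega) (by omega) b hb
      by_cases hlt : m + m' < i
      · obtain ⟨r, -, -, hxr⟩ := inv.comb m m' a b number hm1 hm'1 hlt hma hmb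
          (pv_opsB_sub a b number hops) h0
        exact absurd hxr (inv.no_num r)
      · exact pv_pairup m m' a b number hm1 hm'1 (by omega) hma hmb
          (pv_opsB_sub a b number hops) h0

theorem pv_AInv_step {N number : Int} {i : Nat} {sets : List (PySem.Set Int)}
    {total : PySem.Set Int} (inv : AInv N number i sets total) (h2 : 2 ≤ i) (h8 : i ≤ 8)
    (hno : number ∉ buildA N sets i) :
    AInv N number (i + 1) (sets.set i (PySem.Set.diff (buildA N sets i) total))
      (PySem.Set.update total (PySem.Set.diff (buildA N sets i) total)) := by
  have hilen : i < sets.length := by rw [inv.len]; omega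
  have hself : (sets.set i (PySem.Set.diff (buildA N sets i) total)).getD i []
      = PySem.Set.diff (buildA N sets i) total := pv_getD_set_self sets i _ hilen
  have hne : ∀ n, n ≠ i → (sets.set i (PySem.Set.diff (buildA N sets i) total)).getD n []
      = sets.getD n [] := fun n hn => pv_getD_set_ne sets i n _ hn
  refine ⟨by simp [inv.len], by rw [hne 1 (by omega)]; exact inv.one, ?_, ?_, ?_, ?_, ?_⟩
  · -- mem_E
    intro m x hm hx
    by_cases hmi : m = i
    · subst hmi
      rw [hself, PySem.Set.mem_diff] at hx
      exact ⟨by omega, pv_up inv h2 x hx.1⟩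
    · rw [hne m hmi] at hx
      exact inv.mem_E m x (by omega) hx
  · -- no_num
    intro m
    by_cases hmi : m = i
    · subst hmi
      rw [hself, PySem.Set.mem_diff]
      exact fun h => hno h.1
    · rw [hne m hmi]
      exact inv.no_num m
  · -- comb
    intro m m' a b x h1 h1' hlt ha hb hx h0
    rw [hne m (by omega)] at ha
    rw [hne m' (by omega)] at hb
    by_cases hsum : m + m' < i
    · obtain ⟨r, hr1, hr2, hxr⟩ := inv.comb m m' a b x h1 h1' hsum ha hb hx h0
      exact ⟨r, hr1, hr2, by rw [hne r (by omega)]; exact hxr⟩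
    · have hsum' : m + m' = i := by omega
      have hxs : x ∈ buildA N sets i := pv_pairup m m' a b x h1 h1' hsum' ha hb hx h0
      by_cases htot : x ∈ total
      · obtain ⟨r, hr1, hr2, hxr⟩ := inv.tot x htot
        exact ⟨r, hr1, by omega, by rw [hne r (by omega)]; exact hxr⟩
      · exact ⟨i, by omega, by omega, by rw [hself, PySem.Set.mem_diff]; exact ⟨hxs, htot⟩⟩
  · -- rep
    intro j hj2 hji
    by_cases hjei : j = i
    · subst hjei
      have hxs : repB N j ∈ buildA N sets j := by
        rw [pv_mem_buildA]
        exact Or.inl (pv_repA_eq N j hj2).symm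
      by_cases htot : repB N j ∈ total
      · obtain ⟨r, hr1, hr2, hxr⟩ := inv.tot _ htot
        exact ⟨r, hr1, by omega, by rw [hne r (by omega)]; exact hxr⟩
      · exact ⟨j, by omega, le_refl j, by rw [hself, PySem.Set.mem_diff]; exact ⟨hxs, htot⟩⟩
    · obtain ⟨r, hr1, hr2, hxr⟩ := inv.rep j hj2 (by omega)
      exact ⟨r, hr1, hr2, by rw [hne r (by omega)]; exact hxr⟩
  · -- tot
    intro x hx
    rw [PySem.Set.mem_update] at hx
    rcases hx with hx | hx
    · obtain ⟨m, hm1, hm2, hxm⟩ := inv.tot x hx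
      exact ⟨m, hm1, by omega, by rw [hne m (by omega)]; exact hxm⟩
    · exact ⟨i, by omega, by omega, by rw [hself]; exact hx⟩

theorem pv_getD_init (N : Int) : ∀ m,
    (([[], [N], [], [], [], [], [], [], []] : List (PySem.Set Int))).getD m []
      = if m = 1 then [N] else [] := by
  intro m
  rcases m with _ | _ | _ | _ | _ | _ | _ | _ | _ | m <;> rfl

theorem pv_AInv_init (N number : Int) (hnum : number ≠ N) :
    AInv N number 2
      ((List.replicate 9 (PySem.Set.empty : PySem.Set Int)).set 1
        (PySem.Set.add PySem.Set.empty N))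
      (PySem.Set.add PySem.Set.empty N) := by
  have hsets : (List.replicate 9 (PySem.Set.empty : PySem.Set Int)).set 1
      (PySem.Set.add PySem.Set.empty N)
      = ([[], [N], [], [], [], [], [], [], []] : List (PySem.Set Int)) := rfl
  rw [hsets, pv_add_empty]
  refine ⟨rfl, by rw [pv_getD_init]; rfl, ?_, ?_, ?_, ?_, ?_⟩
  · intro m x hm hx
    rw [pv_getD_init] at hx
    interval_cases m
    · simp at hx
    · simp at hx
      subst hx
      exact ⟨le_refl 1, by rw [pv_Blv_one]; simp⟩
  · intro m
    rw [pv_getD_init]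
    split_ifs with h
    · simpa using hnum
    · simp
  · intro m m' a b x h1 h1' hlt
    omega
  · intro j hj2 hji
    omega
  · intro x hx
    simp at hx
    subst hx
    exact ⟨1, le_refl 1, by omega, by rw [pv_getD_init]; simp⟩

-- A's loop = B's scan over the remaining counts
theorem pv_loops_eq (N number : Int) :
    ∀ d i sets total lvls, i + d = 9 → 2 ≤ i → AInv N number i sets total →
      MemoOK N lvls →
      loopA N number i sets total = nextB N number (List.range' i (9 - i)) lvls := by
  intro d
  induction d with
  | zero =>
    intro i sets total lvls h9 h2 inv hOK
    have hi : i = 9 := by omega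
    subst hi
    rw [loopA]
    norm_num
    rfl
  | succ d ih =>
    intro i sets total lvls h9 h2 inv hOK
    have hi9 : ¬ i ≥ 9 := by omega
    have hrng : List.range' i (9 - i) = i :: List.range' (i + 1) (9 - (i + 1)) := by
      rw [show 9 - i = (9 - (i + 1)) + 1 by omega]
      rfl
    rw [loopA, hrng, nextB]
    simp only [hi9, if_false]
    obtain ⟨hset, hOK'⟩ := pv_reachB_eq N i (by omega) lvls hOK
    have hkey := pv_key inv h2
    by_cases hmem : number ∈ buildA N sets i
    · rw [if_pos hmem, if_pos (by rw [hset, pvMem]; simpa using hkey.mp hmem)]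
    · rw [if_neg hmem, if_neg (by rw [hset, pvMem]; simpa using fun h => hmem (hkey.mpr h))]
      rw [pvDiff_eq, pvUpdate_eq]
      exact ih (i + 1) _ _ _ (by omega) (by omega) (pv_AInv_step inv h2 (by omega) hmem) hOK'

-- ===== VERDICT (by name: the statement is the Claim_ definition above) =====
theorem solution_spec : Claim_equal_solution := by
  intro N number _ _
  unfold Spec_solution solution solution_alt
  have hrng : List.range' 1 8 = 1 :: List.range' 2 7 := rfl
  rw [hrng, nextB]
  obtain ⟨hset1, hOK1⟩ := pv_reachB_eq N 1 (le_refl 1) PySem.Dict.empty (pv_MemoOK_empty N)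
  rw [pv_Blv_one] at hset1
  by_cases h : N = number
  · subst h
    rw [if_pos (by simp), if_pos (by rw [hset1, pvMem]; simp)]
    rfl
  · rw [if_neg (by simpa using h), if_neg (by rw [hset1, pvMem]; simpa using fun e => h e.symm)]
    have := pv_loops_eq N number 7 2 _ _ (reachB N 1 PySem.Dict.empty).2 rfl (by norm_num)
      (pv_AInv_init N number (fun e => h e.symm)) hOK1
    simpa using this
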